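-- pv_equiv track=rewrite | github.com/Laminecode/Projet_NLP | src/semantic_analysis/concordance.py | extract_concordances
-- ===== SOURCE A (Python) =====
-- from typing import Dict, List
--
-- def extract_concordances(
--     docs: Dict[str, str],
--     keyword: str,
--     window: int = 5,
--     max_lines: int = 200
-- ):
--
--     rows = []
--     for doc_id, text in docs.items():
--         tokens = text.split()
--         for i, tok in enumerate(tokens):
--             if tok == keyword:
--                 left = " ".join(tokens[max(0, i-window):i])
--                 right = " ".join(tokens[i+1:i+1+window])
--                 rows.append({
--                     "doc_id": doc_id,
--                     "left": left,
--                     "keyword": keyword,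
--                     "right": right
--                 })
--                 if len(rows) >= max_lines:
--                     return rows
--     return rows
-- ===== SOURCE B (Python) =====
-- def _concordance_rows(docs, keyword, window):
--     for doc_id, text in docs.items():
--         tokens = text.split()
--         for i, tok in enumerate(tokens):
--             if tok == keyword:
--                 yield {
--                     "doc_id": doc_id,
--                     "left": " ".join(tokens[max(0, i - window):i]),
--                     "keyword": keyword,
--                     "right": " ".join(tokens[i + 1:i + 1 + window]),
--                 }
--
--
-- def extract_concordances(docs, keyword, window=5, max_lines=200):
--     # rows are produced by a limit-free generator; the cutoff lives in the consumer
--     return list(_concordance_rows(docs, keyword, window))[:max(0, max_lines)]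
-- ===== Notes on version B (the rewrite author's own statement) =====
-- stated objective: idiomatic
-- what changed: The row-building loop becomes a limit-free generator and the max_lines cutoff moves out of the loop into the consumer, which slices the collected rows with [:max(0, max_lines)].
-- intended difference: When max_lines <= 0 and some document contains the keyword, A still returns one row (its cutoff fires only after the first append), while B returns the empty list, the intended meaning of 'at most max_lines lines'. — e.g. on extract_concordances([("d", "a k b")], "k", 1, 0): A returns [[("doc_id", "d"), ("left", "a"), ("keyword", "k"), ("right", "b")]], B returns []
import Mathlib
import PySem

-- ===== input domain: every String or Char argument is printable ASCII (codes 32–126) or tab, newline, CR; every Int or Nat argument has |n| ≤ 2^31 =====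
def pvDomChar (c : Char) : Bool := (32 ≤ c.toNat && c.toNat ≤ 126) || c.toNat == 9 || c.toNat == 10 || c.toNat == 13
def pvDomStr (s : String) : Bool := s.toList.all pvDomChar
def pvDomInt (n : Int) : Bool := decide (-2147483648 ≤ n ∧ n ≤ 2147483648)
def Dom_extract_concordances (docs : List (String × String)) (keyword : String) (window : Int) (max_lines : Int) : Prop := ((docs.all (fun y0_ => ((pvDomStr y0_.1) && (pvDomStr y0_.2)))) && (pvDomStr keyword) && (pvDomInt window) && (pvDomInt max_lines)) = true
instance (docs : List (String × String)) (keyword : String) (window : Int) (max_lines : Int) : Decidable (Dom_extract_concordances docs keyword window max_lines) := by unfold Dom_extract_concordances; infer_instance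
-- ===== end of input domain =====

-- B moves the max_lines cutoff out of the row loop: a limit-free generator, then a slice in the consumer; idiomatic, not faster.
-- On max_lines ≤ 0 with a match present A still returns one row; B returns [] (see D_ below).


-- ===== PORT A =====
-- inner 'for i, tok in enumerate(tokens)' loop: returns (rows, earlyReturn?)
def aTokLoop (doc_id keyword : String) (window max_lines : Int) (tokens : List String) :
    List (Int × String) → List (List (String × String)) → List (List (String × String)) × Bool
  | [], rows => (rows, false)
  | (i, tok) :: rest, rows =>
    if tok == keyword then
      let left := PySem.Str.join " " (PySem.List.slice tokens (some (max 0 (i - window))) (some i))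
      let right := PySem.Str.join " " (PySem.List.slice tokens (some (i + 1)) (some (i + 1 + window)))
      let rows' := rows ++ [[("doc_id", doc_id), ("left", left), ("keyword", keyword), ("right", right)]]
      if max_lines ≤ PySem.List.len rows' then (rows', true)
      else aTokLoop doc_id keyword window max_lines tokens rest rows'
    else aTokLoop doc_id keyword window max_lines tokens rest rows

-- outer 'for doc_id, text in docs.items()' loop
def aDocLoop (keyword : String) (window max_lines : Int) :
    List (String × String) → List (List (String × String)) → List (List (String × String))
  | [], rows => rows
  | (doc_id, text) :: rest, rows =>
    let tokens := PySem.Str.split₀ text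
    match aTokLoop doc_id keyword window max_lines tokens (PySem.List.enumerate tokens 0) rows with
    | (rows', true) => rows'
    | (rows', false) => aDocLoop keyword window max_lines rest rows'

def extract_concordances (docs : List (String × String)) (keyword : String) (window : Int) (max_lines : Int) : List (List (String × String)) :=
  aDocLoop keyword window max_lines docs []

-- ===== PORT B =====
-- the generator _concordance_rows: all rows, no limit bookkeeping
def bRow (doc_id keyword : String) (window : Int) (tokens : List String) (i : Int) : List (String × String) :=
  [("doc_id", doc_id),
   ("left", PySem.Str.join " " (PySem.List.slice tokens (some (max 0 (i - window))) (some i))),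
   ("keyword", keyword),
   ("right", PySem.Str.join " " (PySem.List.slice tokens (some (i + 1)) (some (i + 1 + window))))]

def bRows (keyword : String) (window : Int) (docs : List (String × String)) : List (List (String × String)) :=
  docs.flatMap (fun p =>
    let tokens := PySem.Str.split₀ p.2
    (PySem.List.enumerate tokens 0).flatMap (fun it =>
      if it.2 == keyword then [bRow p.1 keyword window tokens it.1] else []))

-- list(gen)[:max(0, max_lines)]
def extract_concordances_alt (docs : List (String × String)) (keyword : String) (window : Int) (max_lines : Int) : List (List (String × String)) :=
  PySem.List.slice (bRows keyword window docs) none (some (max 0 max_lines))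

-- ===== PRECONDITION & SPEC =====
-- When max_lines ≤ 0 and some document's tokens contain the keyword, A still returns one row (its
-- cutoff fires only after the first append); B returns [], the intended 'at most max_lines lines'.
def D_extract_concordances (docs : List (String × String)) (keyword : String) (window : Int) (max_lines : Int) : Prop :=
  max_lines ≤ 0 ∧ ∃ p ∈ docs, keyword ∈ PySem.Str.split₀ p.2
instance (docs : List (String × String)) (keyword : String) (window : Int) (max_lines : Int) : Decidable (D_extract_concordances docs keyword window max_lines) := by unfold D_extract_concordances; infer_instance

def Spec_extract_concordances (docs : List (String × String)) (keyword : String) (window : Int) (max_lines : Int) (out : List (List (String × String))) : Prop := ¬ D_extract_concordances docs keyword window max_lines → out = extract_concordances_alt docs keyword window max_lines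
instance (docs : List (String × String)) (keyword : String) (window : Int) (max_lines : Int) (out : List (List (String × String))) : Decidable (Spec_extract_concordances docs keyword window max_lines out) := by unfold Spec_extract_concordances; infer_instance

def pvDiffWitness_extract_concordances : (List (String × String)) × String × Int × Int := ([("d", "a k b")], "k", 1, 0)
def pvDiffWitnessOut_extract_concordances : (List (List (String × String))) × (List (List (String × String))) :=
  ([[("doc_id", "d"), ("left", "a"), ("keyword", "k"), ("right", "b")]], [])

-- ===== CLAIM =====
def Claim_unchanged_extract_concordances : Prop := ∀ (docs : List (String × String)) (keyword : String) (window : Int) (max_lines : Int), Dom_extract_concordances docs keyword window max_lines → Spec_extract_concordances docs keyword window max_lines (extract_concordances docs keyword window max_lines)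
def Claim_changed_extract_concordances : Prop := Dom_extract_concordances (pvDiffWitness_extract_concordances.1) (pvDiffWitness_extract_concordances.2.1) (pvDiffWitness_extract_concordances.2.2.1) (pvDiffWitness_extract_concordances.2.2.2) ∧ D_extract_concordances (pvDiffWitness_extract_concordances.1) (pvDiffWitness_extract_concordances.2.1) (pvDiffWitness_extract_concordances.2.2.1) (pvDiffWitness_extract_concordances.2.2.2) ∧ extract_concordances (pvDiffWitness_extract_concordances.1) (pvDiffWitness_extract_concordances.2.1) (pvDiffWitness_extract_concordances.2.2.1) (pvDiffWitness_extract_concordances.2.2.2) = pvDiffWitnessOut_extract_concordances.1 ∧ extract_concordances_alt (pvDiffWitness_extract_concordances.1) (pvDiffWitness_extract_concordances.2.1) (pvDiffWitness_extract_concordances.2.2.1) (pvDiffWitness_extract_concordances.2.2.2) = pvDiffWitnessOut_extract_concordances.2 ∧ pvDiffWitnessOut_extract_concordances.1 ≠ pvDiffWitnessOut_extract_concordances.2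
def Claim_exact_extract_concordances : Prop := ∀ (docs : List (String × String)) (keyword : String) (window : Int) (max_lines : Int), Dom_extract_concordances docs keyword window max_lines → D_extract_concordances docs keyword window max_lines → extract_concordances docs keyword window max_lines ≠ extract_concordances_alt docs keyword window max_lines

-- ===== LEMMAS AND PROOFS =====

-- proof-only name for the per-token row emitter of bRows
def gTok (keyword : String) (window : Int) (doc_id : String) (tokens : List String)
    (it : Int × String) : List (List (String × String)) :=
  if it.2 == keyword then [bRow doc_id keyword window tokens it.1] else []

theorem alt_eq_take (docs : List (String × String)) (keyword : String) (window max_lines : Int) :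
    extract_concordances_alt docs keyword window max_lines
      = (bRows keyword window docs).take (max 0 max_lines).toNat := by
  rw [extract_concordances_alt, PySem.List.slice_to _ (le_max_left 0 max_lines)]

theorem bRows_cons (keyword : String) (window : Int) (d t : String) (rest : List (String × String)) :
    bRows keyword window ((d, t) :: rest)
      = (PySem.List.enumerate (PySem.Str.split₀ t) 0).flatMap
          (gTok keyword window d (PySem.Str.split₀ t)) ++ bRows keyword window rest := by
  simp only [bRows, List.flatMap_cons]
  rfl

theorem aTokLoop_eq (doc_id keyword : String) (window max_lines : Int) (tokens : List String)
    (hm : 1 ≤ max_lines) :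
    ∀ (items : List (Int × String)) (rows : List (List (String × String))),
      rows.length < max_lines.toNat →
      aTokLoop doc_id keyword window max_lines tokens items rows =
        ((rows ++ items.flatMap (gTok keyword window doc_id tokens)).take max_lines.toNat,
         decide (max_lines.toNat ≤ rows.length + (items.flatMap (gTok keyword window doc_id tokens)).length)) := by
  intro items
  induction items with
  | nil =>
    intro rows h
    simp [aTokLoop, List.take_of_length_le h.le, Nat.not_le.mpr h]
  | cons it rest ih =>
    obtain ⟨i, tok⟩ := it
    intro rows h
    have hfold : ([(("doc_id" : String), doc_id),
        ("left", PySem.Str.join " " (PySem.List.slice tokens (some (max 0 (i - window))) (some i))),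
        ("keyword", keyword),
        ("right", PySem.Str.join " " (PySem.List.slice tokens (some (i + 1)) (some (i + 1 + window))))]
        : List (String × String)) = bRow doc_id keyword window tokens i := rfl
    by_cases htok : (tok == keyword) = true
    · have hrow : gTok keyword window doc_id tokens (i, tok)
          = [bRow doc_id keyword window tokens i] := by simp [gTok, htok]
      simp only [aTokLoop, htok, if_true, PySem.List.len_eq, List.flatMap_cons, hrow, hfold]
      by_cases hstop : max_lines ≤ ((rows.length + 1 : Nat) : Int)
      · rw [if_pos (by simp only [List.length_append, List.length_cons, List.length_nil]; push_cast; push_cast at hstop; omega)]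
        have hlen : (rows ++ [bRow doc_id keyword window tokens i]).length = max_lines.toNat := by
          simp only [List.length_append, List.length_cons, List.length_nil]; omega
        rw [Prod.mk.injEq]
        constructor
        · have hassoc : rows ++ (bRow doc_id keyword window tokens i
              :: rest.flatMap (gTok keyword window doc_id tokens))
              = (rows ++ [bRow doc_id keyword window tokens i])
                ++ rest.flatMap (gTok keyword window doc_id tokens) := by simp
          rw [List.singleton_append, hassoc, List.take_append, hlen, Nat.sub_self,
            List.take_zero, List.append_nil, List.take_of_length_le (le_of_eq hlen)]
        · symm
          rw [decide_eq_true_eq]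
          simp only [List.singleton_append, List.length_cons]
          omega
      · rw [if_neg (by simp only [List.length_append, List.length_cons, List.length_nil]; push_cast; push_cast at hstop; omega)]
        have hlt : (rows ++ [bRow doc_id keyword window tokens i]).length < max_lines.toNat := by
          simp only [List.length_append, List.length_cons, List.length_nil]; omega
        rw [ih _ hlt, Prod.mk.injEq]
        constructor
        · rw [List.append_assoc, List.singleton_append]
        · simp only [List.length_append, List.length_cons, List.length_nil,
            List.singleton_append, decide_eq_decide]
          omega
    · have hrow : gTok keyword window doc_id tokens (i, tok) = [] := by
        simp [gTok]; intro hc; simp [hc] at htok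
      simp only [aTokLoop, htok, Bool.false_eq_true, if_false, List.flatMap_cons, hrow,
        List.nil_append]
      exact ih rows h

theorem aDocLoop_eq (keyword : String) (window max_lines : Int) (hm : 1 ≤ max_lines) :
    ∀ (docs : List (String × String)) (rows : List (List (String × String))),
      rows.length < max_lines.toNat →
      aDocLoop keyword window max_lines docs rows
        = (rows ++ bRows keyword window docs).take max_lines.toNat := by
  intro docs
  induction docs with
  | nil =>
    intro rows h
    simp [aDocLoop, bRows, List.take_of_length_le h.le]
  | cons p rest ih =>
    obtain ⟨d, t⟩ := p
    intro rows h
    rw [bRows_cons]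
    by_cases h1 : max_lines.toNat ≤ rows.length
        + ((PySem.List.enumerate (PySem.Str.split₀ t) 0).flatMap
            (gTok keyword window d (PySem.Str.split₀ t))).length
    · have hstep : aDocLoop keyword window max_lines ((d, t) :: rest) rows
          = (rows ++ (PySem.List.enumerate (PySem.Str.split₀ t) 0).flatMap
              (gTok keyword window d (PySem.Str.split₀ t))).take max_lines.toNat := by
        simp only [aDocLoop]
        rw [aTokLoop_eq d keyword window max_lines (PySem.Str.split₀ t) hm _ rows h,
          decide_eq_true h1]
      rw [hstep, ← List.append_assoc]
      conv_rhs => rw [List.take_append]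
      rw [Nat.sub_eq_zero_of_le (by simp only [List.length_append]; omega),
        List.take_zero, List.append_nil]
    · have hlen : (rows ++ (PySem.List.enumerate (PySem.Str.split₀ t) 0).flatMap
          (gTok keyword window d (PySem.Str.split₀ t))).length < max_lines.toNat := by
        simp only [List.length_append]; omega
      have hstep : aDocLoop keyword window max_lines ((d, t) :: rest) rows
          = aDocLoop keyword window max_lines rest
              (rows ++ (PySem.List.enumerate (PySem.Str.split₀ t) 0).flatMap
                (gTok keyword window d (PySem.Str.split₀ t))) := by
        simp only [aDocLoop]
        rw [aTokLoop_eq d keyword window max_lines (PySem.Str.split₀ t) hm _ rows h,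
          decide_eq_false h1, List.take_of_length_le hlen.le]
      rw [hstep, ih _ hlen, List.append_assoc]

theorem aTokLoop_nomatch (doc_id keyword : String) (window max_lines : Int) (tokens : List String) :
    ∀ (items : List (Int × String)) (rows : List (List (String × String))),
      (∀ it ∈ items, (it.2 == keyword) = false) →
      aTokLoop doc_id keyword window max_lines tokens items rows = (rows, false) := by
  intro items
  induction items with
  | nil => intro rows _; rfl
  | cons it rest ih =>
    intro rows h
    have h0 := h it (by simp)
    obtain ⟨i, tok⟩ := it
    simp only [aTokLoop, h0, Bool.false_eq_true, if_false]
    exact ih rows (fun x hx => h x (by simp [hx]))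

theorem enumerate_nomatch (keyword : String) (tokens : List String)
    (h : keyword ∉ tokens) :
    ∀ it ∈ PySem.List.enumerate tokens 0, (it.2 == keyword) = false := by
  intro it hit
  rw [PySem.List.mem_enumerate_iff] at hit
  obtain ⟨k, hk, rfl⟩ := hit
  simp only [beq_eq_false_iff_ne, ne_eq]
  intro hc
  exact h (hc ▸ List.getElem_mem hk)

theorem aDocLoop_nomatch (keyword : String) (window max_lines : Int) :
    ∀ (docs : List (String × String)) (rows : List (List (String × String))),
      (∀ p ∈ docs, keyword ∉ PySem.Str.split₀ p.2) →
      aDocLoop keyword window max_lines docs rows = rows := by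
  intro docs
  induction docs with
  | nil => intro rows _; rfl
  | cons p rest ih =>
    obtain ⟨d, t⟩ := p
    intro rows h
    have hnm := enumerate_nomatch keyword (PySem.Str.split₀ t) (h (d, t) (by simp))
    simp only [aDocLoop]
    rw [aTokLoop_nomatch d keyword window max_lines _ _ rows hnm]
    exact ih rows (fun x hx => h x (by simp [hx]))

theorem bRows_nomatch (keyword : String) (window : Int) (docs : List (String × String))
    (h : ∀ p ∈ docs, keyword ∉ PySem.Str.split₀ p.2) :
    bRows keyword window docs = [] := by
  rw [bRows, List.flatMap_eq_nil_iff]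
  intro p hp
  rw [List.flatMap_eq_nil_iff]
  intro it hit
  have := enumerate_nomatch keyword (PySem.Str.split₀ p.2) (h p hp) it hit
  simp only [beq_eq_false_iff_ne, ne_eq] at this
  simp [this]

theorem aTokLoop_match (doc_id keyword : String) (window max_lines : Int) (tokens : List String)
    (hml : max_lines ≤ 0) :
    ∀ (items : List (Int × String)) (rows : List (List (String × String))),
      (∃ it ∈ items, (it.2 == keyword) = true) →
      ∃ r, aTokLoop doc_id keyword window max_lines tokens items rows = (rows ++ [r], true) := by
  intro items
  induction items with
  | nil => intro rows h; simp at h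
  | cons it rest ih =>
    obtain ⟨i, tok⟩ := it
    intro rows h
    by_cases htok : (tok == keyword) = true
    · refine ⟨bRow doc_id keyword window tokens i, ?_⟩
      simp only [aTokLoop, htok, if_true]
      rw [if_pos (by
        simp only [PySem.List.len_eq, List.length_append, List.length_cons, List.length_nil]
        push_cast; omega)]
      rfl
    · obtain ⟨x, hx, hxk⟩ := h
      have hxr : x ∈ rest := by
        rcases List.mem_cons.1 hx with h1 | h1
        · subst h1; simp [htok] at hxk
        · exact h1
      obtain ⟨r, hr⟩ := ih rows ⟨x, hxr, hxk⟩
      exact ⟨r, by simp only [aTokLoop, htok, Bool.false_eq_true, if_false]; exact hr⟩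

theorem aDocLoop_ne_nil (keyword : String) (window max_lines : Int) (hml : max_lines ≤ 0) :
    ∀ (docs : List (String × String)) (rows : List (List (String × String))),
      (∃ p ∈ docs, keyword ∈ PySem.Str.split₀ p.2) →
      aDocLoop keyword window max_lines docs rows ≠ [] := by
  intro docs
  induction docs with
  | nil => intro rows h; simp at h
  | cons p rest ih =>
    obtain ⟨d, t⟩ := p
    intro rows h
    by_cases hh : keyword ∈ PySem.Str.split₀ t
    · obtain ⟨k, hk, hke⟩ := List.mem_iff_getElem.1 hh
      have hmem : ((0 + (k : Int)), (PySem.Str.split₀ t)[k]) ∈ PySem.List.enumerate (PySem.Str.split₀ t) 0 := by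
        rw [PySem.List.mem_enumerate_iff]
        exact ⟨k, hk, rfl⟩
      obtain ⟨r, hr⟩ := aTokLoop_match d keyword window max_lines (PySem.Str.split₀ t) hml
        (PySem.List.enumerate (PySem.Str.split₀ t) 0) rows ⟨_, hmem, by simp [hke]⟩
      simp only [aDocLoop]
      rw [hr]
      simp
    · have hnm := enumerate_nomatch keyword (PySem.Str.split₀ t) hh
      simp only [aDocLoop]
      rw [aTokLoop_nomatch d keyword window max_lines _ _ rows hnm]
      refine ih rows ?_
      obtain ⟨p, hp, hpk⟩ := h
      rcases List.mem_cons.1 hp with h1 | h1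
      · subst h1; exact absurd hpk hh
      · exact ⟨p, h1, hpk⟩

-- ===== VERDICT =====
theorem extract_concordances_spec : Claim_unchanged_extract_concordances := by
  intro docs keyword window max_lines _ hnd
  by_cases hm : 1 ≤ max_lines
  · rw [extract_concordances,
      aDocLoop_eq keyword window max_lines hm docs [] (by simp only [List.length_nil]; omega),
      alt_eq_take, List.nil_append]
    congr 1
    omega
  · have hml : max_lines ≤ 0 := by omega
    have hno : ∀ p ∈ docs, keyword ∉ PySem.Str.split₀ p.2 := by
      intro p hp hc
      exact hnd ⟨hml, p, hp, hc⟩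
    rw [extract_concordances, aDocLoop_nomatch keyword window max_lines docs [] hno,
      alt_eq_take, bRows_nomatch keyword window docs hno]
    simp

theorem extract_concordances_changed : Claim_changed_extract_concordances := by
  unfold Claim_changed_extract_concordances
  decide

theorem extract_concordances_tight : Claim_exact_extract_concordances := by
  intro docs keyword window max_lines _ hd
  obtain ⟨hml, hex⟩ := hd
  have hB : extract_concordances_alt docs keyword window max_lines = [] := by
    rw [alt_eq_take]
    have h0 : (max 0 max_lines).toNat = 0 := by omega
    simp [h0]
  rw [hB]
  exact aDocLoop_ne_nil keyword window max_lines hml docs [] hex
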